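-- pv_equiv track=rewrite | github.com/taniaip/python_scripts_Roger_lab | motif_structure_map.py | structural_context_per_base
-- ===== SOURCE A (Python) =====
-- from typing import Dict, List, Tuple, Optional
--
-- def structural_context_per_base(dot: str, pairs: Dict[int, int]) -> List[str]:
--     """
--     Label each position as:
--       - 'stem' if paired
--       - 'loop' if unpaired but enclosed inside any pair
--       - 'external' if unpaired outside all pairs
--     Enclosed check is done by tracking nesting depth.
--     """
--     ctx = []
--     depth = 0
--     for i, ch in enumerate(dot):
--         if ch == "(":
--             depth += 1
--             ctx.append("stem")
--         elif ch == ")":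
--             ctx.append("stem")
--             depth -= 1
--         else:  # '.'
--             ctx.append("loop" if depth > 0 else "external")
--     if depth != 0:
--         raise ValueError("Dot-bracket depth not zero at end (unbalanced).")
--     return ctx
-- ===== SOURCE B (Python) =====
-- from itertools import accumulate
--
-- def structural_context_per_base(dot, pairs):
--     depths = list(accumulate((1 if c == "(" else -1 if c == ")" else 0) for c in dot))
--     if depths and depths[-1] != 0:
--         raise ValueError("Dot-bracket depth not zero at end (unbalanced).")
--     return ["stem" if c in "()" else ("loop" if d > 0 else "external")
--             for c, d in zip(dot, depths)]
-- ===== Notes on version B (the rewrite author's own statement) =====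
-- stated objective: alternative
-- what changed: B replaces A's single stateful loop (mutable depth + list appends) with a two-phase decomposition: a cumulative-sum depth table via itertools.accumulate, then a stateless per-position labelling pass over zip(dot, depths).
import Mathlib
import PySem

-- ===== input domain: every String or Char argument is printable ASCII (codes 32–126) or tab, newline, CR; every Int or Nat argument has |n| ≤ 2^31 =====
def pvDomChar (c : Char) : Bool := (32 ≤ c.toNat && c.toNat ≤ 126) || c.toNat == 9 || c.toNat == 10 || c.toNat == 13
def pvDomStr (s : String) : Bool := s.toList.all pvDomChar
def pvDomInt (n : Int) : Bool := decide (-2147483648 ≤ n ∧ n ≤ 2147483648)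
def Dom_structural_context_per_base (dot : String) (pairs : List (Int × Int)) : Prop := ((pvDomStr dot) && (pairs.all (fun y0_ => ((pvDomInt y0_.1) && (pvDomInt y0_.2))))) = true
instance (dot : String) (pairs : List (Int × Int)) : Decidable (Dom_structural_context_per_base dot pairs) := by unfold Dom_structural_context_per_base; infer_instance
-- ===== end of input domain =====

-- B relabels bases via a precomputed cumulative-depth table and a stateless zip/map pass,
-- instead of A's single stateful accumulator loop (alternative decomposition, same cost).


-- ===== PORT A =====
-- A: one loop, state (ctx, depth); appends a label per char, mutating depth.
def structural_context_per_base (dot : String) (pairs : List (Int × Int)) : List String :=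
  let st := dot.toList.foldl (fun (s : List String × Int) ch =>
    if ch = '(' then (s.1 ++ ["stem"], s.2 + 1)
    else if ch = ')' then (s.1 ++ ["stem"], s.2 - 1)
    else (s.1 ++ [if s.2 > 0 then "loop" else "external"], s.2)) ([], 0)
  st.1

-- ===== PORT B =====
def scpbDelta (c : Char) : Int := if c = '(' then 1 else if c = ')' then -1 else 0
-- itertools.accumulate of the per-char deltas, starting from d
def scpbAccum : List Char → Int → List Int
  | [], _ => []
  | c :: cs, d => (d + scpbDelta c) :: scpbAccum cs (d + scpbDelta c)
def scpbLabel (cd : Char × Int) : String :=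
  if cd.1 = '(' ∨ cd.1 = ')' then "stem" else if cd.2 > 0 then "loop" else "external"
def structural_context_per_base_alt (dot : String) (pairs : List (Int × Int)) : List String :=
  let depths := scpbAccum dot.toList 0
  (dot.toList.zip depths).map scpbLabel

-- ===== PRECONDITION & SPEC =====
-- Pre_ excludes exactly the unbalanced strings, on which A raises ValueError.
def Pre_structural_context_per_base (dot : String) (pairs : List (Int × Int)) : Prop :=
  dot.toList.count '(' = dot.toList.count ')'
instance (dot : String) (pairs : List (Int × Int)) : Decidable (Pre_structural_context_per_base dot pairs) := by unfold Pre_structural_context_per_base; infer_instance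
def pvWitness_structural_context_per_base : String × (List (Int × Int)) := ("(.).", [])

def Spec_structural_context_per_base (dot : String) (pairs : List (Int × Int)) (out : List String) : Prop := out = structural_context_per_base_alt dot pairs
instance (dot : String) (pairs : List (Int × Int)) (out : List String) : Decidable (Spec_structural_context_per_base dot pairs out) := by unfold Spec_structural_context_per_base; infer_instance

-- ===== CLAIM (what is proved, stated in full; the proofs are below) =====
def Claim_equal_structural_context_per_base : Prop := ∀ (dot : String) (pairs : List (Int × Int)), Dom_structural_context_per_base dot pairs → Pre_structural_context_per_base dot pairs → Spec_structural_context_per_base dot pairs (structural_context_per_base dot pairs)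

-- ===== LEMMAS AND PROOFS =====
lemma scpb_fold (cs : List Char) (d : Int) (acc : List String) :
    (cs.foldl (fun (s : List String × Int) ch =>
      if ch = '(' then (s.1 ++ ["stem"], s.2 + 1)
      else if ch = ')' then (s.1 ++ ["stem"], s.2 - 1)
      else (s.1 ++ [if s.2 > 0 then "loop" else "external"], s.2)) (acc, d)).1
    = acc ++ (cs.zip (scpbAccum cs d)).map scpbLabel := by
  induction cs generalizing d acc with
  | nil => simp
  | cons c cs ih =>
    by_cases h1 : c = '('
    · rw [List.foldl_cons]; simp only [if_pos h1]
      rw [ih]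
      simp [scpbAccum, scpbDelta, scpbLabel, h1]
    · by_cases h2 : c = ')'
      · rw [List.foldl_cons]; simp only [if_neg h1, if_pos h2]
        rw [ih]
        simp [scpbAccum, scpbDelta, scpbLabel, h1, h2, sub_eq_add_neg]
      · rw [List.foldl_cons]; simp only [if_neg h1, if_neg h2]
        rw [ih]
        simp [scpbAccum, scpbDelta, scpbLabel, h1, h2]

-- ===== VERDICT (by name: the statement is the Claim_ definition above) =====
theorem structural_context_per_base_spec : Claim_equal_structural_context_per_base := by
  intro dot pairs _ _
  unfold Spec_structural_context_per_base structural_context_per_base structural_context_per_base_alt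
  simpa using scpb_fold dot.toList 0 []
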